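-- pv_equiv track=rewrite | github.com/SomeOne768/TP_Secu_IOT | S8_Failles_et_attaques/brut_force.py | iterateur_perso
-- ===== SOURCE A (Python) =====
-- def key_from_index(usefull_char, indice):
--     s = ""
--     for i in range(len(usefull_char)):
--         s += usefull_char[i][ indice[i] ]
--
--     return s
--
-- def iterateur_perso(usefull_char):
--     keySize = len(usefull_char)
--     indice = [0 for i in range(keySize)]
--     indice_max = [len(usefull_char[i])-1 for i in range(keySize)]
--     key = key_from_index(usefull_char, indice)
--     yield key
--     while indice != indice_max:
--         # on incremente
--         j = keySize-1
--         trouve = False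
--         while (j>=0) and indice[j] == indice_max[j]:
--             j-=1
--         indice[j] += 1
--
--         #Si on ne pouvait pas incrementer avant alors il faut mettre à 0
--         j += 1
--         while (j<keySize):
--             indice[j] = 0
--             j+=1
--
--         key = key_from_index(usefull_char, indice)
--         yield key
-- ===== SOURCE B (Python) =====
-- def iterateur_perso(usefull_char):
--     if not usefull_char:
--         yield ""
--         return
--     first = usefull_char[0]
--     rest = usefull_char[1:]
--     for c in first:
--         for suffix in iterateur_perso(rest):
--             yield c + suffix
-- ===== Notes on version B (the rewrite author's own statement) =====
-- stated objective: simpler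
-- what changed: Replaced the index-vector odometer (an indices list incremented with carry by three nested while-loops, re-reading characters by index each round) with a direct recursive generator over the list of character lists that yields c + suffix for each head character and each recursively generated suffix.
import Mathlib
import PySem

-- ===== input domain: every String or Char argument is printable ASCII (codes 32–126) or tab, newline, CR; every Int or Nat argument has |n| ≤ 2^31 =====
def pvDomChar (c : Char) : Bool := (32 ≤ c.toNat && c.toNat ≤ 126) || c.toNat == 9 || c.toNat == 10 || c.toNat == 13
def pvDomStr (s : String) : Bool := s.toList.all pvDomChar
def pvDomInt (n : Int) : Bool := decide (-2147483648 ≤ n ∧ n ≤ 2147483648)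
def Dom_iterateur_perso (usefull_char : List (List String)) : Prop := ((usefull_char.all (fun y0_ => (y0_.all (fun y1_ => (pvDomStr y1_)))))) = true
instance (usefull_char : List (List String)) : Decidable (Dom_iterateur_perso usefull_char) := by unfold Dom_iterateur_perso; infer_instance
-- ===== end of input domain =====

-- B replaces A's index-vector odometer (increment-with-carry loops over an indices list)
-- by a direct structural recursion on the list of character lists (objective: simpler);
-- both enumerate the cartesian product with the last position varying fastest.

-- ===== PORT A =====
-- key_from_index: s = ""; for i in range(len(uc)): s += uc[i][indice[i]]
-- (indexing ported with pyGetD; Pre_ guarantees every index read is in range, so no default is ever used)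
def pvKeyA (uc : List (List String)) (ind : List Int) : String :=
  (PySem.List.pyRange 0 (uc.length : Int) 1).foldl
    (fun s i => s ++ PySem.List.pyGetD (PySem.List.pyGetD uc i []) (PySem.List.pyGetD ind i 0) "") ""

-- j = keySize-1; while (j>=0) and indice[j] == indice_max[j]: j -= 1
-- (fuel = list length only makes the loop total; the loop stops by itself at j = -1)
def pvFindJ (ind imax : List Int) : Nat → Int → Int
  | 0, j => j
  | fuel + 1, j =>
    if 0 ≤ j ∧ PySem.List.pyGetD ind j 0 = PySem.List.pyGetD imax j 0 then
      pvFindJ ind imax fuel (j - 1)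
    else j

-- l[j] = v  (Python index assignment, with Python's negative-index wrap via pyIdx?)
def pvSetIdx (l : List Int) (j : Int) (v : Int) : List Int :=
  match PySem.List.pyIdx? l.length j with
  | some k => l.set k v
  | none => l

-- j += 1; while (j < keySize): indice[j] = 0; j += 1   (fuel as above)
def pvZero (keySize : Int) : Nat → List Int → Int → List Int
  | 0, l, _ => l
  | fuel + 1, l, j => if j < keySize then pvZero keySize fuel (pvSetIdx l j 0) (j + 1) else l

-- one body of A's outer while-loop: find j, increment indice[j], zero the suffix
def pvStep (keySize : Int) (ind imax : List Int) : List Int :=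
  let j := pvFindJ ind imax ind.length (keySize - 1)
  let ind1 := pvSetIdx ind j (PySem.List.pyGetD ind j 0 + 1)
  pvZero keySize ind.length ind1 (j + 1)

-- while indice != indice_max: …; yield key   (fuel only makes the loop total; it is never exhausted under Pre_)
def pvLoopA (uc : List (List String)) (imax : List Int) : List Int → Nat → List String
  | _, 0 => []
  | ind, fuel + 1 =>
    if ind = imax then []
    else
      let ind' := pvStep (uc.length : Int) ind imax
      pvKeyA uc ind' :: pvLoopA uc imax ind' fuel

def iterateur_perso (usefull_char : List (List String)) : List String :=
  let keySize := usefull_char.length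
  let indice : List Int := (PySem.List.pyRange 0 (keySize : Int) 1).map (fun _ => 0)
  let indice_max : List Int := (PySem.List.pyRange 0 (keySize : Int) 1).map
    (fun i => ((PySem.List.pyGetD usefull_char i []).length : Int) - 1)
  pvKeyA usefull_char indice :: pvLoopA usefull_char indice_max indice ((usefull_char.map List.length).prod)

-- ===== PORT B =====
-- recursive generator: for c in first: for suffix in iterateur_perso(rest): yield c + suffix
def iterateur_perso_alt : List (List String) → List String
  | [] => [""]
  | first :: rest => first.flatMap (fun c => (iterateur_perso_alt rest).map (fun suffix => c ++ suffix))

-- ===== PRECONDITION & SPEC =====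
-- Pre_ excludes inputs containing an empty sublist: there A raises IndexError (key_from_index indexes [0] into an empty list).
def Pre_iterateur_perso (usefull_char : List (List String)) : Prop :=
  ∀ l ∈ usefull_char, l ≠ []
instance (usefull_char : List (List String)) : Decidable (Pre_iterateur_perso usefull_char) := by
  unfold Pre_iterateur_perso; infer_instance
def pvWitness_iterateur_perso : List (List String) := [["a", "b"], ["c"]]

def Spec_iterateur_perso (usefull_char : List (List String)) (out : List String) : Prop := out = iterateur_perso_alt usefull_char
instance (usefull_char : List (List String)) (out : List String) : Decidable (Spec_iterateur_perso usefull_char out) := by unfold Spec_iterateur_perso; infer_instance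

-- ===== CLAIM (what is proved, stated in full; the proofs are below) =====
def Claim_equal_iterateur_perso : Prop := ∀ (usefull_char : List (List String)), Dom_iterateur_perso usefull_char → Pre_iterateur_perso usefull_char → Spec_iterateur_perso usefull_char (iterateur_perso usefull_char)

-- ===== LEMMAS AND PROOFS =====

-- mathematical model: the selection string of an index vector, and the product order
def pvCast (v : List Nat) : List Int := v.map (fun n => (Nat.cast n : Int))

def pvSel : List (List String) → List Nat → String
  | [], _ => ""
  | _ :: _, [] => ""
  | l :: ls, i :: vs => l.getD i "" ++ pvSel ls vs

def pvIdxs : List Nat → List (List Nat)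
  | [] => [[]]
  | n :: ns => (List.range n).flatMap (fun i => (pvIdxs ns).map (i :: ·))

def pvMax (ns : List Nat) : List Nat := ns.map (fun n => n - 1)

def pvSucc : List Nat → List Nat → List Nat
  | i :: vs, _ :: ns => if vs = pvMax ns then (i + 1) :: List.replicate vs.length 0 else i :: pvSucc vs ns
  | _, _ => []

def pvFrom : List Nat → List Nat → List (List Nat)
  | i :: vs, n :: ns =>
      (pvFrom vs ns).map (i :: ·) ++ ((List.range n).drop (i + 1)).flatMap (fun i' => (pvIdxs ns).map (i' :: ·))
  | _, _ => [[]]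

def pvValid (v ns : List Nat) : Prop := List.Forall₂ (fun i n => i < n) v ns

-- ---- small helpers ----
theorem pv_cast_inj {v w : List Nat} (h : pvCast v = pvCast w) : v = w := by
  unfold pvCast at h
  exact (List.map_injective_iff.mpr (fun a b hab => by exact_mod_cast hab)) h

theorem pv_cast_getD (v : List Nat) (k : Nat) : (pvCast v).getD k 0 = ((v.getD k 0 : Nat) : Int) := by
  induction v generalizing k with
  | nil => simp [pvCast]
  | cons a v ih =>
    cases k with
    | zero => simp [pvCast]
    | succ k => simpa [pvCast] using ih k

theorem pv_map_range_getD {α β : Type} (uc : List α) (f : α → β) (d : α) :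
    (List.range uc.length).map (fun k => f (uc.getD k d)) = uc.map f := by
  induction uc with
  | nil => simp
  | cons a l ih =>
    simp only [List.length_cons, List.range_succ_eq_map, List.map_cons, List.map_map,
      List.getD_cons_zero]
    refine congrArg _ ?_
    rw [← ih]
    refine List.map_congr_left ?_
    intro k _
    simp

theorem pv_replicate_valid (ns : List Nat) (h : ∀ n ∈ ns, 1 ≤ n) :
    pvValid (List.replicate ns.length 0) ns := by
  induction ns with
  | nil => exact List.Forall₂.nil
  | cons n ns ih =>
    simp only [List.length_cons, List.replicate_succ]
    exact List.Forall₂.cons (h n (by simp)) (ih (fun m hm => h m (by simp [hm])))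

-- ---- B side ----
theorem pv_flatMap_getD {α β : Type} (l : List α) (f : α → List β) (d : α) :
    l.flatMap f = (List.range l.length).flatMap (fun i => f (l.getD i d)) := by
  induction l with
  | nil => simp
  | cons a l ih =>
    simp only [List.length_cons, List.range_succ_eq_map, List.flatMap_cons, List.flatMap_map,
      List.getD_cons_zero, Nat.succ_eq_add_one, List.getD_cons_succ]
    rw [ih]

theorem pv_alt_eq_map_sel (uc : List (List String)) :
    iterateur_perso_alt uc = (pvIdxs (uc.map List.length)).map (pvSel uc) := by
  induction uc with
  | nil => simp [iterateur_perso_alt, pvIdxs, pvSel]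
  | cons l ls ih =>
    rw [iterateur_perso_alt, ih, pv_flatMap_getD l _ ""]
    simp only [List.map_cons, pvIdxs, List.map_flatMap]
    congr 1
    funext i
    simp [List.map_map, Function.comp_def, pvSel]

-- ---- A side: key ----
theorem pv_key_aux (uc : List (List String)) (v : List Nat) (s0 : String) (h : v.length = uc.length) :
    (List.range uc.length).foldl (fun s k => s ++ (uc.getD k []).getD (v.getD k 0) "") s0
      = s0 ++ pvSel uc v := by
  induction uc generalizing v s0 with
  | nil => simp [pvSel]
  | cons l ls ih =>
    cases v with
    | nil => simp at h
    | cons i vs =>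
      simp only [List.length_cons, List.range_succ_eq_map, List.foldl_cons, List.foldl_map,
        List.getD_cons_zero, pvSel]
      have hb : ∀ (s : String) (k : Nat),
          s ++ ((l :: ls).getD (k.succ) []).getD ((i :: vs).getD (k.succ) 0) ""
            = s ++ (ls.getD k []).getD (vs.getD k 0) "" := by
        intro s k; simp
      simp only [hb]
      rw [ih vs _ (by simpa using h), String.append_assoc]

theorem pv_keyA_eq_sel (uc : List (List String)) (v : List Nat) (h : v.length = uc.length) :
    pvKeyA uc (pvCast v) = pvSel uc v := by
  unfold pvKeyA
  rw [PySem.List.pyRange_zero_nat, List.foldl_map]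
  have hb : ∀ (s : String) (k : Nat),
      s ++ PySem.List.pyGetD (PySem.List.pyGetD uc (k : Int) []) (PySem.List.pyGetD (pvCast v) (k : Int) 0) ""
        = s ++ (uc.getD k []).getD (v.getD k 0) "" := by
    intro s k
    rw [PySem.List.pyGetD_natCast, PySem.List.pyGetD_natCast, pv_cast_getD,
      PySem.List.pyGetD_natCast]
  simp only [hb]
  rw [pv_key_aux uc v "" h, String.empty_append]

-- ---- structure of pvFrom ----
theorem pv_from_ne_nil_head (v ns : List Nat) (h : v.length = ns.length) :
    ∃ t, pvFrom v ns = v :: t := by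
  induction v generalizing ns with
  | nil =>
    cases ns with
    | nil => exact ⟨[], rfl⟩
    | cons n ns => simp at h
  | cons i vs ih =>
    cases ns with
    | nil => simp at h
    | cons n ns =>
      obtain ⟨t, ht⟩ := ih ns (by simpa using h)
      refine ⟨List.map (fun x => i :: x) t ++ ((List.range n).drop (i + 1)).flatMap
        (fun i' => (pvIdxs ns).map (fun x => i' :: x)), ?_⟩
      rw [pvFrom, ht]
      simp

theorem pv_idxs_length (ns : List Nat) : (pvIdxs ns).length = ns.prod := by
  induction ns with
  | nil => simp [pvIdxs]
  | cons n ns ih =>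
    simp [pvIdxs, List.length_flatMap, ih, List.map_const',
      List.sum_replicate, smul_eq_mul]

theorem pv_from_max (ns : List Nat) (h : ∀ n ∈ ns, 1 ≤ n) : pvFrom (pvMax ns) ns = [pvMax ns] := by
  induction ns with
  | nil => rfl
  | cons n ns ih =>
    have hn : 1 ≤ n := h n (by simp)
    have hc : pvMax (n :: ns) = (n - 1) :: pvMax ns := rfl
    rw [hc, pvFrom, ih (fun m hm => h m (by simp [hm]))]
    have hd : (List.range n).drop (n - 1 + 1) = [] :=
      List.drop_eq_nil_of_le (by simp; omega)
    simp [hd]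

theorem pv_from_zeros (ns : List Nat) (h : ∀ n ∈ ns, 1 ≤ n) :
    pvFrom (List.replicate ns.length 0) ns = pvIdxs ns := by
  induction ns with
  | nil => rfl
  | cons n ns ih =>
    have hn : 1 ≤ n := h n (by simp)
    simp only [List.length_cons, List.replicate_succ]
    rw [pvFrom, ih (fun m hm => h m (by simp [hm]))]
    have hr : List.range n = 0 :: (List.range n).drop 1 := by
      conv_lhs => rw [← List.drop_zero (l := List.range n),
        List.drop_eq_getElem_cons (by simpa using hn)]
      simp
    conv_rhs => rw [pvIdxs, hr]
    simp

theorem pv_from_succ (v ns : List Nat) (hv : pvValid v ns) :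
    (∀ n ∈ ns, 1 ≤ n) → v ≠ pvMax ns → pvFrom v ns = v :: pvFrom (pvSucc v ns) ns := by
  induction hv with
  | nil => intro _ hne; exact absurd rfl hne
  | @cons i n vs ns hin htl ih =>
    intro h1 hne
    by_cases hm : vs = pvMax ns
    · have hi : i < n - 1 := by
        have hne' : i ≠ n - 1 := by
          intro hh; exact hne (by rw [hh, hm]; rfl)
        omega
      have hlen : vs.length = ns.length := htl.length_eq
      have h1' : ∀ m ∈ ns, 1 ≤ m := fun m hm' => h1 m (by simp [hm'])
      have hsucc : pvSucc (i :: vs) (n :: ns) = (i + 1) :: List.replicate vs.length 0 := by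
        rw [pvSucc, if_pos hm]
      have hd : (List.range n).drop (i + 1) = (i + 1) :: (List.range n).drop (i + 1 + 1) := by
        rw [List.drop_eq_getElem_cons (by simpa using (by omega : i + 1 < n))]
        simp
      rw [pvFrom]
      rw [show pvFrom vs ns = [vs] from by rw [hm]; exact pv_from_max ns h1']
      rw [hsucc, pvFrom, hlen, pv_from_zeros ns h1', hd, List.flatMap_cons]
      simp
    · have hsucc : pvSucc (i :: vs) (n :: ns) = i :: pvSucc vs ns := by
        rw [pvSucc, if_neg hm]
      rw [pvFrom, ih (fun m hm' => h1 m (by simp [hm'])) hm, hsucc, pvFrom]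
      simp

theorem pv_succ_valid (v ns : List Nat) (hv : pvValid v ns) :
    (∀ n ∈ ns, 1 ≤ n) → v ≠ pvMax ns → pvValid (pvSucc v ns) ns := by
  induction hv with
  | nil => intro _ hne; exact absurd rfl hne
  | @cons i n vs ns hin htl ih =>
    intro h1 hne
    by_cases hm : vs = pvMax ns
    · have hi : i < n - 1 := by
        have hne' : i ≠ n - 1 := by intro hh; exact hne (by rw [hh, hm]; rfl)
        omega
      rw [pvSucc, if_pos hm, htl.length_eq]
      exact List.Forall₂.cons (by omega)
        (pv_replicate_valid ns (fun m hm' => h1 m (by simp [hm'])))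
    · rw [pvSucc, if_neg hm]
      exact List.Forall₂.cons hin (ih (fun m hm' => h1 m (by simp [hm'])) hm)

theorem pv_succ_length (v ns : List Nat) (hv : pvValid v ns)
    (h1 : ∀ n ∈ ns, 1 ≤ n) (hne : v ≠ pvMax ns) : (pvSucc v ns).length = v.length := by
  rw [(pv_succ_valid v ns hv h1 hne).length_eq, hv.length_eq]

-- ---- A side: step ----
theorem pv_findJ_succ (ind imax : List Int) (fuel : Nat) (j : Int) :
    pvFindJ ind imax (fuel + 1) j =
      (if 0 ≤ j ∧ PySem.List.pyGetD ind j 0 = PySem.List.pyGetD imax j 0 then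
        pvFindJ ind imax fuel (j - 1) else j) := rfl

theorem pv_findJ_neg (ind imax : List Int) (fuel : Nat) (j : Int) (h : j < 0) :
    pvFindJ ind imax fuel j = j := by
  cases fuel with
  | zero => rfl
  | succ fuel => rw [pv_findJ_succ, if_neg (by rintro ⟨h0, -⟩; omega)]

theorem pv_findJ_ge (ind imax : List Int) (fuel : Nat) : ∀ (j : Int),
    -1 ≤ j → -1 ≤ pvFindJ ind imax fuel j := by
  induction fuel with
  | zero => intro j hj; exact hj
  | succ fuel ih =>
    intro j hj
    rw [pv_findJ_succ]
    split_ifs with h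
    · exact ih (j - 1) (by omega)
    · exact hj

theorem pv_findJ_le (ind imax : List Int) (fuel : Nat) : ∀ (j : Int),
    pvFindJ ind imax fuel j ≤ j := by
  induction fuel with
  | zero => intro j; exact le_refl j
  | succ fuel ih =>
    intro j
    rw [pv_findJ_succ]
    split_ifs with h
    · exact le_trans (ih (j - 1)) (by omega)
    · exact le_refl j

theorem pv_findJ_cons (a b : Int) (l m : List Int) : ∀ (k : Nat), ∀ (f : Nat), k ≤ f →
    pvFindJ (a :: l) (b :: m) (f + 1) ((k : Nat) : Int) =
      (if pvFindJ l m f ((k : Int) - 1) = -1 then (if a = b then (-1 : Int) else 0)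
       else pvFindJ l m f ((k : Int) - 1) + 1) := by
  intro k
  induction k with
  | zero =>
    intro f _
    have hinner : pvFindJ l m f (((0 : Nat) : Int) - 1) = -1 := by
      rw [pv_findJ_neg l m f _ (by omega)]
      decide
    rw [hinner, if_pos rfl, pv_findJ_succ]
    by_cases hab : a = b
    · rw [if_pos hab,
        if_pos ⟨by omega, by
          rw [PySem.List.pyGetD_natCast, PySem.List.pyGetD_natCast]
          simpa using hab⟩]
      rw [pv_findJ_neg _ _ _ _ (by omega)]
      decide
    · rw [if_neg hab,
        if_neg (by
          rintro ⟨-, heq⟩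
          rw [PySem.List.pyGetD_natCast, PySem.List.pyGetD_natCast] at heq
          exact hab (by simpa using heq))]
      decide
  | succ k ihk =>
    intro f hkf
    obtain ⟨f', rfl⟩ : ∃ f', f = f' + 1 := ⟨f - 1, by omega⟩
    have hgl : PySem.List.pyGetD (a :: l) ((k + 1 : Nat) : Int) 0 = PySem.List.pyGetD l (k : Int) 0 := by
      rw [PySem.List.pyGetD_natCast, PySem.List.pyGetD_natCast, List.getD_cons_succ]
    have hgm : PySem.List.pyGetD (b :: m) ((k + 1 : Nat) : Int) 0 = PySem.List.pyGetD m (k : Int) 0 := by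
      rw [PySem.List.pyGetD_natCast, PySem.List.pyGetD_natCast, List.getD_cons_succ]
    have hsh : ((k + 1 : Nat) : Int) - 1 = (k : Int) := by push_cast; ring
    rw [hsh]
    by_cases hc : PySem.List.pyGetD l (k : Int) 0 = PySem.List.pyGetD m (k : Int) 0
    · have hlhs : pvFindJ (a :: l) (b :: m) (f' + 1 + 1) ((k + 1 : Nat) : Int)
          = pvFindJ (a :: l) (b :: m) (f' + 1) ((k : Nat) : Int) := by
        rw [pv_findJ_succ, if_pos ⟨by omega, by rw [hgl, hgm]; exact hc⟩, hsh]
      have hrhs : pvFindJ l m (f' + 1) (k : Int) = pvFindJ l m f' ((k : Int) - 1) := by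
        rw [pv_findJ_succ, if_pos ⟨by omega, hc⟩]
      rw [hlhs, ihk f' (by omega), hrhs]
    · have hlhs : pvFindJ (a :: l) (b :: m) (f' + 1 + 1) ((k + 1 : Nat) : Int) = ((k + 1 : Nat) : Int) := by
        rw [pv_findJ_succ, if_neg]
        rintro ⟨-, heq⟩
        rw [hgl, hgm] at heq
        exact hc heq
      have hrhs : pvFindJ l m (f' + 1) (k : Int) = (k : Int) := by
        rw [pv_findJ_succ, if_neg]
        rintro ⟨-, heq⟩
        exact hc heq
      rw [hlhs, hrhs, if_neg (by omega)]
      push_cast; ring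

theorem pv_findJ_neg_iff (v ns : List Nat) (hv : pvValid v ns) :
    (pvFindJ (pvCast v) (pvCast (pvMax ns)) v.length ((v.length : Int) - 1) = -1 ↔ v = pvMax ns) := by
  induction hv with
  | nil =>
    constructor
    · intro _; rfl
    · intro _; decide
  | @cons i n vs ns hin htl ih =>
    have hlen : ((i :: vs).length : Int) - 1 = ((vs.length : Nat) : Int) := by simp
    have hcv : pvCast (i :: vs) = ((i : Nat) : Int) :: pvCast vs := rfl
    have hmax : pvCast (pvMax (n :: ns)) = ((n - 1 : Nat) : Int) :: pvCast (pvMax ns) := rfl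
    rw [hlen, hcv, hmax, show (i :: vs).length = vs.length + 1 from rfl,
      pv_findJ_cons _ _ _ _ vs.length vs.length le_rfl]
    have hge : -1 ≤ pvFindJ (pvCast vs) (pvCast (pvMax ns)) vs.length ((vs.length : Int) - 1) :=
      pv_findJ_ge _ _ _ _ (by omega)
    constructor
    · intro h
      split_ifs at h with h1 h2
      · have hvs : vs = pvMax ns := ih.mp h1
        have hi : i = n - 1 := by exact_mod_cast h2
        rw [hi, hvs]; rfl
      all_goals exact absurd h (by omega)
    · intro h
      have hinj : i = n - 1 ∧ vs = pvMax ns := by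
        have hcons : (i :: vs) = (n - 1) :: pvMax ns := h
        exact ⟨by injection hcons, by injection hcons⟩
      rw [if_pos (ih.mpr hinj.2),
        if_pos (show ((i : Nat) : Int) = ((n - 1 : Nat) : Int) by exact_mod_cast hinj.1)]

-- set / zero helpers
theorem pv_setIdx_nat (l : List Int) (k : Nat) (v : Int) : pvSetIdx l (k : Int) v = l.set k v := by
  unfold pvSetIdx PySem.List.pyIdx?
  by_cases h : k < l.length
  · rw [if_pos (by omega : (0 : Int) ≤ (k : Int)), if_pos (by exact_mod_cast h)]
    simp
  · have h2 : l.length ≤ k := by omega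
    rw [if_pos (by omega : (0 : Int) ≤ (k : Int)), if_neg (by exact_mod_cast h)]
    exact (List.set_eq_of_length_le h2).symm

theorem pv_setIdx_cons (a : Int) (l : List Int) (j v : Int) (h : 1 ≤ j) :
    pvSetIdx (a :: l) j v = a :: pvSetIdx l (j - 1) v := by
  unfold pvSetIdx PySem.List.pyIdx?
  by_cases hlt : j < ((a :: l).length : Int)
  · rw [if_pos (by omega), if_pos (by simpa using hlt), if_pos (by omega),
      if_pos (by simp at hlt ⊢; omega)]
    have hn : j.toNat = (j - 1).toNat + 1 := by omega
    rw [hn]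
    show (a :: l).set ((j - 1).toNat + 1) v = a :: l.set (j - 1).toNat v
    rw [List.set_cons_succ]
  · rw [if_pos (by omega), if_neg (by simpa using hlt), if_pos (by omega),
      if_neg (by simp at hlt ⊢; omega)]

theorem pv_getD_cons (a : Int) (l : List Int) (j : Int) (h : 1 ≤ j) :
    PySem.List.pyGetD (a :: l) j 0 = PySem.List.pyGetD l (j - 1) 0 := by
  rw [PySem.List.pyGetD_of_nonneg _ _ (by omega), PySem.List.pyGetD_of_nonneg _ _ (by omega)]
  have hn : j.toNat = (j - 1).toNat + 1 := by omega
  rw [hn, List.getD_cons_succ]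

theorem pv_zero_succ (K : Int) (fuel : Nat) (l : List Int) (j : Int) :
    pvZero K (fuel + 1) l j = (if j < K then pvZero K fuel (pvSetIdx l j 0) (j + 1) else l) := rfl

theorem pv_zero_cons (a : Int) (fuel : Nat) : ∀ (K j : Int) (l : List Int),
    1 ≤ j → pvZero (K + 1) fuel (a :: l) j = a :: pvZero K fuel l (j - 1) := by
  induction fuel with
  | zero => intro K j l _; rfl
  | succ fuel ih =>
    intro K j l hj
    rw [pv_zero_succ, pv_zero_succ]
    by_cases h : j < K + 1
    · rw [if_pos h, if_pos (by omega : j - 1 < K), pv_setIdx_cons a l j 0 hj,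
        ih K (j + 1) (pvSetIdx l (j - 1) 0) (by omega), show j + 1 - 1 = j - 1 + 1 by ring]
    · rw [if_neg h, if_neg (by omega : ¬(j - 1 < K))]

theorem pv_zero_fuel (K : Int) : ∀ (f1 f2 : Nat) (l : List Int) (j : Int),
    (K - j).toNat ≤ f1 → (K - j).toNat ≤ f2 → pvZero K f1 l j = pvZero K f2 l j := by
  intro f1
  induction f1 with
  | zero =>
    intro f2 l j h1 _
    cases f2 with
    | zero => rfl
    | succ f2 =>
      rw [pv_zero_succ, if_neg (by omega)]
      rfl
  | succ f1 ih =>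
    intro f2 l j h1 h2
    by_cases h : j < K
    · obtain ⟨f2', rfl⟩ : ∃ f2', f2 = f2' + 1 := ⟨f2 - 1, by omega⟩
      rw [pv_zero_succ, pv_zero_succ, if_pos h, if_pos h]
      exact ih f2' _ _ (by omega) (by omega)
    · cases f2 with
      | zero =>
        rw [pv_zero_succ, if_neg h]
        rfl
      | succ f2 => rw [pv_zero_succ, pv_zero_succ, if_neg h, if_neg h]

theorem pv_zero_all (d : Nat) : ∀ (fuel : Nat) (l : List Int) (j : Nat), l.length = j + d → d ≤ fuel →
    pvZero (l.length : Int) fuel l (j : Int) = l.take j ++ List.replicate d 0 := by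
  induction d with
  | zero =>
    intro fuel l j h _
    have hfin : l.take j ++ List.replicate 0 (0 : Int) = l := by
      simp [List.take_of_length_le (show l.length ≤ j by omega)]
    cases fuel with
    | zero => exact hfin.symm
    | succ fuel =>
      rw [pv_zero_succ, if_neg (show ¬((j : Int) < (l.length : Int)) by omega)]
      exact hfin.symm
  | succ d ih =>
    intro fuel l j h hd
    obtain ⟨f, rfl⟩ : ∃ f, fuel = f + 1 := ⟨fuel - 1, by omega⟩
    rw [pv_zero_succ]
    rw [if_pos (show (j : Int) < (l.length : Int) by omega)]
    rw [pv_setIdx_nat]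
    have hlen : (l.set j 0).length = l.length := by simp
    have hj1 : ((j : Int) + 1) = ((j + 1 : Nat) : Int) := by push_cast; ring
    rw [hj1, show (l.length : Int) = ((l.set j 0).length : Int) by rw [hlen],
      ih f (l.set j 0) (j + 1) (by simp; omega) (by omega)]
    have htake : (l.set j 0).take (j + 1) = l.take j ++ [0] := by
      rw [List.take_add_one, List.take_set_of_le (by omega),
        List.getElem?_set_self (by omega)]
      rfl
    rw [htake, List.append_assoc]
    rfl

theorem pv_step_eq_succ (v ns : List Nat) (hv : pvValid v ns) :
    (∀ n ∈ ns, 1 ≤ n) → v ≠ pvMax ns →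
    pvStep (v.length : Int) (pvCast v) (pvCast (pvMax ns)) = pvCast (pvSucc v ns) := by
  induction hv with
  | nil => intro _ hne; exact absurd rfl hne
  | @cons i n vs ns hin htl ih =>
    intro h1 hne
    have h1' : ∀ m ∈ ns, 1 ≤ m := fun m hm' => h1 m (by simp [hm'])
    have hn : 1 ≤ n := h1 n (by simp)
    have hlen : vs.length = ns.length := htl.length_eq
    have hlv : (pvCast vs).length = vs.length := by simp [pvCast]
    have hstart : ((i :: vs).length : Int) - 1 = ((vs.length : Nat) : Int) := by simp
    have hcv : pvCast (i :: vs) = ((i : Nat) : Int) :: pvCast vs := rfl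
    have hmax : pvCast (pvMax (n :: ns)) = ((n - 1 : Nat) : Int) :: pvCast (pvMax ns) := rfl
    have hge : -1 ≤ pvFindJ (pvCast vs) (pvCast (pvMax ns)) vs.length ((vs.length : Int) - 1) :=
      pv_findJ_ge _ _ _ _ (by omega)
    have hK : (((i :: vs).length : Nat) : Int) = ((vs.length : Nat) : Int) + 1 := by simp
    simp only [pvStep]
    rw [hstart, hcv, hmax,
      show ((((i : Nat) : Int)) :: pvCast vs).length = vs.length + 1 from by simp [hlv],
      pv_findJ_cons _ _ _ _ vs.length vs.length le_rfl]
    by_cases hm : vs = pvMax ns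
    · have hr : pvFindJ (pvCast vs) (pvCast (pvMax ns)) vs.length ((vs.length : Int) - 1) = -1 :=
        (pv_findJ_neg_iff vs ns htl).mpr hm
      have hi : i ≠ n - 1 := by intro hh; exact hne (by rw [hh, hm]; rfl)
      have hicast : ((i : Nat) : Int) ≠ ((n - 1 : Nat) : Int) := by
        intro hh; exact hi (by exact_mod_cast hh)
      rw [hr, if_pos rfl, if_neg hicast]
      have hget0 : PySem.List.pyGetD (((i : Nat) : Int) :: pvCast vs) (0 : Int) 0 = ((i : Nat) : Int) := by
        rw [show (0 : Int) = ((0 : Nat) : Int) from rfl, PySem.List.pyGetD_natCast,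
          List.getD_cons_zero]
      rw [hget0,
        show pvSetIdx (((i : Nat) : Int) :: pvCast vs) (0 : Int) (((i : Nat) : Int) + 1)
          = (((i : Nat) : Int) + 1) :: pvCast vs by
          rw [show (0 : Int) = ((0 : Nat) : Int) from rfl, pv_setIdx_nat, List.set_cons_zero]]
      rw [hK, show (0 : Int) + 1 = 1 by ring,
        pv_zero_cons _ (vs.length + 1) _ _ _ (by omega)]
      have hz : pvZero ((vs.length : Nat) : Int) (vs.length + 1) (pvCast vs) ((0 : Nat) : Int)
          = List.replicate vs.length 0 := by
        rw [show ((vs.length : Nat) : Int) = (((pvCast vs).length : Nat) : Int) by rw [hlv],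
          pv_zero_all (pvCast vs).length (vs.length + 1) (pvCast vs) 0 (by omega) (by omega)]
        simp [hlv]
      rw [show (1 : Int) - 1 = ((0 : Nat) : Int) by decide, hz]
      rw [show pvSucc (i :: vs) (n :: ns) = (i + 1) :: List.replicate vs.length 0 from by
        rw [pvSucc, if_pos hm]]
      unfold pvCast
      rw [List.map_cons, List.map_replicate]
      push_cast
      rfl
    · have hr : pvFindJ (pvCast vs) (pvCast (pvMax ns)) vs.length ((vs.length : Int) - 1) ≠ -1 := by
        intro hh; exact hm ((pv_findJ_neg_iff vs ns htl).mp hh)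
      have hs := ih h1' hm
      simp only [pvStep] at hs
      rw [hlv] at hs
      rw [if_neg hr]
      set r := pvFindJ (pvCast vs) (pvCast (pvMax ns)) vs.length ((vs.length : Int) - 1) with hrdef
      have hr0 : 0 ≤ r := by omega
      have hrle : r ≤ (vs.length : Int) - 1 := pv_findJ_le _ _ _ _
      rw [pv_getD_cons _ _ _ (by omega), show r + 1 - 1 = r by ring]
      rw [pv_setIdx_cons _ _ _ _ (by omega), show r + 1 - 1 = r by ring]
      rw [hK, pv_zero_cons _ (vs.length + 1) _ _ _ (by omega)]
      rw [show r + 1 + 1 - 1 = r + 1 by ring]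
      have heqf := pv_zero_fuel ((vs.length : Nat) : Int) (vs.length + 1) vs.length
        (pvSetIdx (pvCast vs) r (PySem.List.pyGetD (pvCast vs) r 0 + 1)) (r + 1)
        (by omega) (by omega)
      rw [heqf, hs]
      rw [show pvSucc (i :: vs) (n :: ns) = i :: pvSucc vs ns from by rw [pvSucc, if_neg hm]]
      rfl

-- ---- the loop ----
theorem pv_loopA_eq (uc : List (List String)) (fuel : Nat) :
    ∀ (v : List Nat),
    (∀ n ∈ uc.map List.length, 1 ≤ n) → pvValid v (uc.map List.length) →
    (pvFrom v (uc.map List.length)).length ≤ fuel + 1 →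
    pvLoopA uc (pvCast (pvMax (uc.map List.length))) (pvCast v) fuel
      = ((pvFrom v (uc.map List.length)).tail).map (pvSel uc) := by
  induction fuel with
  | zero =>
    intro v h1 hv hfuel
    obtain ⟨t, ht⟩ := pv_from_ne_nil_head v _ hv.length_eq
    rw [ht] at hfuel ⊢
    have hnil : t = [] := by
      have hlt := hfuel
      simp only [List.length_cons] at hlt
      exact List.eq_nil_of_length_eq_zero (by omega)
    rw [hnil]
    rfl
  | succ fuel ih =>
    intro v h1 hv hfuel
    by_cases hveq : v = pvMax (uc.map List.length)
    · simp only [pvLoopA]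
      rw [if_pos (by rw [hveq]), hveq, pv_from_max _ h1]
      rfl
    · simp only [pvLoopA]
      rw [if_neg (fun hc => hveq (pv_cast_inj hc))]
      have hlen2 : ((uc.length : Nat) : Int) = ((v.length : Nat) : Int) := by
        rw [hv.length_eq]; simp
      rw [hlen2, pv_step_eq_succ v _ hv h1 hveq]
      have hfs := pv_from_succ v _ hv h1 hveq
      rw [hfs, List.tail_cons]
      have hsl : (pvSucc v (uc.map List.length)).length = uc.length := by
        rw [pv_succ_length v _ hv h1 hveq, hv.length_eq]; simp
      rw [pv_keyA_eq_sel uc _ hsl]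
      have hsv := pv_succ_valid v _ hv h1 hveq
      have hlensucc : (pvFrom v (uc.map List.length)).length
          = (pvFrom (pvSucc v (uc.map List.length)) (uc.map List.length)).length + 1 := by
        rw [hfs]; rfl
      rw [ih (pvSucc v _) h1 hsv (by omega)]
      obtain ⟨t, ht⟩ := pv_from_ne_nil_head (pvSucc v _) _ hsv.length_eq
      rw [ht]
      rfl

-- ===== VERDICT (by name: the statement is the Claim_ definition above) =====
theorem iterateur_perso_spec : Claim_equal_iterateur_perso := by
  intro uc _ hpre
  unfold Spec_iterateur_perso
  have h1 : ∀ n ∈ uc.map List.length, 1 ≤ n := by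
    intro n hn
    simp only [List.mem_map] at hn
    obtain ⟨l, hl, rfl⟩ := hn
    have hne := hpre l hl
    have : l.length ≠ 0 := by simpa [List.length_eq_zero_iff] using hne
    omega
  simp only [iterateur_perso]
  have hzeros : ((PySem.List.pyRange 0 (uc.length : Int) 1).map (fun _ => (0 : Int)))
      = pvCast (List.replicate (uc.map List.length).length 0) := by
    rw [PySem.List.pyRange_zero_nat, List.map_map]
    have h0 : ((fun _ : Int => (0 : Int)) ∘ fun k : Nat => (k : Int)) = fun _ : Nat => (0 : Int) := rfl
    rw [h0, List.map_const', List.length_range]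
    unfold pvCast
    rw [List.map_replicate, List.length_map]
    norm_num
  have himax : ((PySem.List.pyRange 0 (uc.length : Int) 1).map
        (fun i => ((PySem.List.pyGetD uc i []).length : Int) - 1))
      = pvCast (pvMax (uc.map List.length)) := by
    rw [PySem.List.pyRange_zero_nat, List.map_map]
    have hb : (fun k : Nat => ((PySem.List.pyGetD uc (k : Int) []).length : Int) - 1)
        = fun k : Nat => ((uc.getD k []).length : Int) - 1 := by
      funext k; rw [PySem.List.pyGetD_natCast]
    rw [show ((fun i => ((PySem.List.pyGetD uc i []).length : Int) - 1) ∘ fun k : Nat => (k : Int))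
        = fun k : Nat => ((PySem.List.pyGetD uc (k : Int) []).length : Int) - 1 from rfl, hb]
    rw [pv_map_range_getD uc (fun l => ((l.length : Int) - 1)) []]
    unfold pvCast pvMax
    rw [List.map_map, List.map_map]
    refine List.map_congr_left ?_
    intro l hl
    have hge : 1 ≤ l.length := by
      have hne := hpre l hl
      have : l.length ≠ 0 := by simpa [List.length_eq_zero_iff] using hne
      omega
    show (l.length : Int) - 1 = ((l.length - 1 : Nat) : Int)
    omega
  rw [hzeros, himax]
  rw [pv_keyA_eq_sel uc _ (by simp)]
  have hval : pvValid (List.replicate (uc.map List.length).length 0) (uc.map List.length) :=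
    pv_replicate_valid _ h1
  have hz := pv_from_zeros (uc.map List.length) h1
  rw [pv_loopA_eq uc _ _ h1 hval (by rw [hz, pv_idxs_length]; simp)]
  obtain ⟨t, ht⟩ := pv_from_ne_nil_head (List.replicate (uc.map List.length).length 0)
    (uc.map List.length) (by simp)
  rw [pv_alt_eq_map_sel, ← hz, ht]
  rfl
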